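-- pv_equiv track=rewrite | github.com/calinvladth/docker-example | eshop_server/products/managers.py | check_extension
-- ===== SOURCE A (Python) =====
-- def check_extension(image):
--     obj = str(image).lower()
--     approved_extensions = ['.jpeg', '.jpg', '.png']
--     match = False
--     extension = ''
--
--     for o in approved_extensions:
--         if obj.endswith(o):
--             match = True
--             extension = o
--             break
--
--     if not match:
--         raise ValueError('File format is invalid')
--
--     return extension
-- ===== SOURCE B (Python) =====
-- def check_extension(image):
--     obj = str(image).lower()
--     ext = obj[obj.rfind('.'):]
--     if ext in ('.jpeg', '.jpg', '.png'):
--         return ext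
--     raise ValueError('File format is invalid')
-- ===== Notes on version B (the rewrite author's own statement) =====
-- stated objective: simpler
-- what changed: Instead of iterating over the whitelist testing endswith for each suffix, B extracts the single candidate extension once (slice from the last dot via rfind) and does one membership test against the whitelist.
import Mathlib
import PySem

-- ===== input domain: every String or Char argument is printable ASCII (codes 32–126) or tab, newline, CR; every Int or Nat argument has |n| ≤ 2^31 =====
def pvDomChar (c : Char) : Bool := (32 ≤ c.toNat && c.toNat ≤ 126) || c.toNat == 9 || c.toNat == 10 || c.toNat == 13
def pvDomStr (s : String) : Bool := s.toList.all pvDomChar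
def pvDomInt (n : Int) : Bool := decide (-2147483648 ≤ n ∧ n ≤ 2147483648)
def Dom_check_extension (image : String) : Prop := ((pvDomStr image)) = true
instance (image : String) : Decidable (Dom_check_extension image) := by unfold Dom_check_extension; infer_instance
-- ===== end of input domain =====

-- B replaces A's endswith-loop over the whitelist by a single candidate-extension
-- extraction (slice from the last dot) plus one membership test: simpler/shorter.


-- ===== PORT A =====
-- the for-loop with break over approved_extensions, carrying (match, extension)
def checkExtLoop (obj : List Char) : List (List Char) → Bool × List Char
  | [] => (false, [])
  | o :: rest => if PySem.Chars.endswith obj o then (true, o) else checkExtLoop obj rest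

def check_extension (image : String) : String :=
  match checkExtLoop (PySem.Chars.lower image.toList)
      [".jpeg".toList, ".jpg".toList, ".png".toList] with
  | (true, ext) => String.ofList ext
  | (false, _) => ""   -- raise ValueError('File format is invalid'): excluded by Pre_

-- ===== PORT B =====
-- ext = obj[obj.rfind('.'):]
def extOf (obj : List Char) : List Char :=
  PySem.Chars.slice obj (some (PySem.Chars.rfind obj ['.'])) none

-- if ext in ('.jpeg', '.jpg', '.png'): return ext; else raise (excluded by Pre_)
def extCheck (ext : List Char) : String :=
  if ext = ".jpeg".toList ∨ ext = ".jpg".toList ∨ ext = ".png".toList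
  then String.ofList ext else ""

def check_extension_alt (image : String) : String :=
  extCheck (extOf (PySem.Chars.lower image.toList))

-- ===== PRECONDITION & SPEC =====
-- Pre_ = exactly the inputs where A returns (no ValueError): the lowered string
-- ends with one of the approved extensions.
def Pre_check_extension (image : String) : Prop :=
  PySem.Str.endswith (PySem.Str.lower image) ".jpeg" = true ∨
  PySem.Str.endswith (PySem.Str.lower image) ".jpg" = true ∨
  PySem.Str.endswith (PySem.Str.lower image) ".png" = true
instance (image : String) : Decidable (Pre_check_extension image) := by
  unfold Pre_check_extension; infer_instance
def pvWitness_check_extension : String := "Photo.PNG"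

def Spec_check_extension (image : String) (out : String) : Prop := out = check_extension_alt image
instance (image : String) (out : String) : Decidable (Spec_check_extension image out) := by unfold Spec_check_extension; infer_instance

-- ===== CLAIM (what is proved, stated in full; the proofs are below) =====
def Claim_equal_check_extension : Prop := ∀ (image : String), Dom_check_extension image → Pre_check_extension image → Spec_check_extension image (check_extension image)

-- ===== LEMMAS AND PROOFS =====

theorem isPrefixOf_single (c : Char) (l : List Char) :
    [c].isPrefixOf l = true ↔ l[0]? = some c := by
  cases l with
  | nil => simp [List.isPrefixOf]
  | cons a t =>
    simp [List.isPrefixOf]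
    constructor
    · intro h; simp [h]
    · intro h; simp [h]

-- rfind.go returns k when obj[k] = c and no later position holds c
theorem rfind_go_spec (obj : List Char) (c : Char) (k : Nat) (i : Nat)
    (hk : obj[k]? = some c) (hki : k ≤ i)
    (hnone : ∀ j, k < j → obj[j]? ≠ some c) :
    PySem.Chars.rfind.go obj [c] i = (k : Int) := by
  induction i with
  | zero =>
    have hk0 : k = 0 := Nat.le_zero.mp hki
    subst hk0
    simp only [PySem.Chars.rfind.go]
    rw [if_pos ((isPrefixOf_single c obj).2 hk)]
    simp
  | succ i ih =>
    by_cases h : k = i + 1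
    · subst h
      simp only [PySem.Chars.rfind.go]
      rw [if_pos ((isPrefixOf_single c _).2 (by simpa using hk))]
    · have hki' : k ≤ i := by omega
      have hne : ¬ ([c].isPrefixOf (List.drop (i + 1) obj) = true) := by
        rw [isPrefixOf_single]
        simpa using hnone (i + 1) (by omega)
      simp only [PySem.Chars.rfind.go]
      rw [if_neg hne]
      exact ih hki'

theorem rfind_dot (pre t : List Char) (ht : '.' ∉ t) :
    PySem.Chars.rfind (pre ++ '.' :: t) ['.'] = (pre.length : Int) := by
  unfold PySem.Chars.rfind
  apply rfind_go_spec
  · simp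
  · simp
  · intro j hj
    rcases Nat.lt_or_ge j (pre ++ '.' :: t).length with hlt | hge
    · have hj' : j - pre.length - 1 < t.length := by simp at hlt; omega
      rw [List.getElem?_append_right (by omega)]
      have hsub : j - pre.length = (j - pre.length - 1) + 1 := by omega
      rw [hsub]
      simp only [List.getElem?_cons_succ]
      rw [List.getElem?_eq_getElem hj']
      intro h
      exact ht (by rw [← Option.some_inj.1 h]; exact List.getElem_mem _)
    · rw [List.getElem?_eq_none hge]; simp

theorem not_suffix_of_suffix {s1 s2 obj : List Char} (h : s2 <:+ obj)
    (h12 : ¬ s1 <:+ s2) (h21 : ¬ s2 <:+ s1) : ¬ s1 <:+ obj := by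
  intro h1
  rcases List.suffix_or_suffix_of_suffix h1 h with h' | h'
  · exact h12 h'
  · exact h21 h'

-- when obj = pre ++ '.' :: t with '.' ∉ t, B's candidate extension is '.' :: t
theorem extOf_eval (pre t : List Char) (ht : '.' ∉ t) :
    extOf (pre ++ '.' :: t) = '.' :: t := by
  unfold extOf
  rw [rfind_dot pre t ht, PySem.Chars.slice_eq_listSlice,
    PySem.List.slice_from_natCast, List.drop_left]

theorem check_extension_spec' (image : String)
    (hpre : Pre_check_extension image) :
    check_extension image = check_extension_alt image := by
  unfold Pre_check_extension at hpre
  simp only [PySem.Str.endswith_eq, PySem.Str.toList_lower] at hpre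
  rcases hpre with h | h | h
  all_goals
    rw [PySem.Chars.endswith_iff] at h
    obtain ⟨pre, hpre⟩ := h
  · -- ends with ".jpeg"
    have e1 : PySem.Chars.endswith (PySem.Chars.lower image.toList) ".jpeg".toList = true :=
      (PySem.Chars.endswith_iff _ _).2 ⟨pre, hpre⟩
    simp only [check_extension, check_extension_alt, checkExtLoop, e1, if_true]
    rw [show PySem.Chars.lower image.toList = pre ++ '.' :: "jpeg".toList from hpre.symm,
      extOf_eval pre "jpeg".toList (by decide)]
    rfl
  · -- ends with ".jpg"
    have e1 : PySem.Chars.endswith (PySem.Chars.lower image.toList) ".jpeg".toList = false :=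
      Bool.eq_false_iff.mpr (fun hE => not_suffix_of_suffix ⟨pre, hpre⟩ (by decide) (by decide)
        ((PySem.Chars.endswith_iff _ _).1 hE))
    have e2 : PySem.Chars.endswith (PySem.Chars.lower image.toList) ".jpg".toList = true :=
      (PySem.Chars.endswith_iff _ _).2 ⟨pre, hpre⟩
    simp only [check_extension, check_extension_alt, checkExtLoop, e1, e2,
      Bool.false_eq_true, if_false, if_true]
    rw [show PySem.Chars.lower image.toList = pre ++ '.' :: "jpg".toList from hpre.symm,
      extOf_eval pre "jpg".toList (by decide)]
    rfl
  · -- ends with ".png"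
    have e1 : PySem.Chars.endswith (PySem.Chars.lower image.toList) ".jpeg".toList = false :=
      Bool.eq_false_iff.mpr (fun hE => not_suffix_of_suffix ⟨pre, hpre⟩ (by decide) (by decide)
        ((PySem.Chars.endswith_iff _ _).1 hE))
    have e2 : PySem.Chars.endswith (PySem.Chars.lower image.toList) ".jpg".toList = false :=
      Bool.eq_false_iff.mpr (fun hE => not_suffix_of_suffix ⟨pre, hpre⟩ (by decide) (by decide)
        ((PySem.Chars.endswith_iff _ _).1 hE))
    have e3 : PySem.Chars.endswith (PySem.Chars.lower image.toList) ".png".toList = true :=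
      (PySem.Chars.endswith_iff _ _).2 ⟨pre, hpre⟩
    simp only [check_extension, check_extension_alt, checkExtLoop, e1, e2, e3,
      Bool.false_eq_true, if_false, if_true]
    rw [show PySem.Chars.lower image.toList = pre ++ '.' :: "png".toList from hpre.symm,
      extOf_eval pre "png".toList (by decide)]
    rfl

-- ===== VERDICT (by name: the statement is the Claim_ definition above) =====
theorem check_extension_spec : Claim_equal_check_extension := by
  intro image _ hpre
  exact check_extension_spec' image hpre
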